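-- pv_equiv track=rewrite | github.com/Yassinecoder06/ACM | Contests/Codeforces Round 1073 (Div.2)/B_MEX_Reordering.py | can_reorder
-- ===== SOURCE A (Python) =====
-- def MEX(a: list):
--     s = set(a)
--     mex = 0
--     while mex in s:
--         mex += 1
--     return mex
--
-- def check_valid_ordering(arr):
--     n = len(arr)
--     for i in range(n - 1):
--         prefix_mex = MEX(arr[:i + 1])
--         suffix_mex = MEX(arr[i + 1:])
--         if prefix_mex == suffix_mex:
--             return False
--     return True
--
-- def can_reorder(a):
--     n = len(a)
--
--     if len(set(a)) == 1:
--         return False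
--
--     orderings = [
--         a,
--         sorted(a),
--         sorted(a, reverse=True),
--     ]
--
--     for ordering in orderings:
--         if check_valid_ordering(ordering):
--             return True
--
--     return False
-- ===== SOURCE B (Python) =====
-- def can_reorder(a):
--     if len(set(a)) == 1:
--         return False
--     return (_valid(a)
--             or _valid(sorted(a))
--             or _valid(sorted(a, reverse=True)))
--
-- def _valid(arr):
--     # forward sweep for prefix MEXes, backward sweep for suffix MEXes;
--     # the MEX pointer only ever advances within a sweep
--     n = len(arr)
--     pm = []
--     seen = set()
--     m = 0
--     for x in arr:
--         seen.add(x)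
--         while m in seen:
--             m += 1
--         pm.append(m)
--     sm = []
--     seen = set()
--     m = 0
--     for x in reversed(arr):
--         seen.add(x)
--         while m in seen:
--             m += 1
--         sm.append(m)
--     sm.reverse()
--     return all(pm[i] != sm[i + 1] for i in range(n - 1))
-- ===== Notes on version B (the rewrite author's own statement) =====
-- stated objective: alternative
-- what changed: Each candidate ordering is now checked with two linear sweeps that maintain the prefix and suffix MEXes incrementally with a monotone pointer, instead of recomputing the MEX from scratch on both slices at every split point.
import Mathlib
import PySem

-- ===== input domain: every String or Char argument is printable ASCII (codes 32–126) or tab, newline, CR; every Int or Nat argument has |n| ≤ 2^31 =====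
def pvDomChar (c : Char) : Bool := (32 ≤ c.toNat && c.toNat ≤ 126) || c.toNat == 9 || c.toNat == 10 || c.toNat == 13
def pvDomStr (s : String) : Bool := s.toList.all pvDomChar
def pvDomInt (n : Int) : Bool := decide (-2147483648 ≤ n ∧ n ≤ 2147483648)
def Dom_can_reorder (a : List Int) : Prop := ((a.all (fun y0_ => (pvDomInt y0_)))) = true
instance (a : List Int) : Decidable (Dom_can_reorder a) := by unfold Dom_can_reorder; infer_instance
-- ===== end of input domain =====

-- B replaces A's per-split MEX recomputation by two linear sweeps that maintain the prefix
-- and suffix MEXes incrementally with a monotone pointer (objective: alternative).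

-- ===== PORT A =====
-- Shared totalization of the Python 'while mex in s: mex += 1' loop; fuel = |s| (distinct
-- elements) always suffices, proved below (whileMex_mexP), so the port is exact.
def whileMex (s : List Int) (m : Nat) (fuel : Nat) : Nat :=
  match fuel with
  | 0 => m
  | fuel + 1 => if (m : Int) ∈ s then whileMex s (m + 1) fuel else m

def pyMEX (a : List Int) : Nat :=
  let s : PySem.Set Int := PySem.Set.ofList a
  whileMex s 0 s.length

def checkValidOrdering (arr : List Int) : Bool :=
  (List.range (arr.length - 1)).all (fun i =>
    pyMEX (PySem.List.slice arr none (some ((i : Int) + 1))) !=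
    pyMEX (PySem.List.slice arr (some ((i : Int) + 1)) none))

def can_reorder (a : List Int) : Bool :=
  if PySem.Set.len (PySem.Set.ofList a) == 1 then false
  else
    [a,
     PySem.List.sorted a (fun x => x) false,
     PySem.List.sorted a (fun x => x) true].any checkValidOrdering

-- ===== PORT B =====
-- one incremental step: add x to seen, re-advance the MEX pointer from its old value
def mexStep (st : PySem.Set Int × Nat × List Nat) (x : Int) : PySem.Set Int × Nat × List Nat :=
  let seen := PySem.Set.add st.1 x
  let m := whileMex seen st.2.1 seen.length
  (seen, m, st.2.2 ++ [m])

-- the running-prefix MEXes of arr, in one pass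
def mexList (arr : List Int) : List Nat :=
  (arr.foldl mexStep ((PySem.Set.empty : PySem.Set Int), 0, ([] : List Nat))).2.2

def validB (arr : List Int) : Bool :=
  let pm := mexList arr
  let sm := (mexList arr.reverse).reverse
  (List.range (arr.length - 1)).all (fun i => pm.getD i 0 != sm.getD (i + 1) 0)

def can_reorder_alt (a : List Int) : Bool :=
  if PySem.Set.len (PySem.Set.ofList a) == 1 then false
  else
    validB a ||
    validB (PySem.List.sorted a (fun x => x) false) ||
    validB (PySem.List.sorted a (fun x => x) true)

-- ===== PRECONDITION & SPEC =====
def Spec_can_reorder (a : List Int) (out : Bool) : Prop := out = can_reorder_alt a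
instance (a : List Int) (out : Bool) : Decidable (Spec_can_reorder a out) := by unfold Spec_can_reorder; infer_instance

-- ===== CLAIM (what is proved, stated in full; the proofs are below) =====
def Claim_equal_can_reorder : Prop := ∀ (a : List Int), Dom_can_reorder a → Spec_can_reorder a (can_reorder a)

-- ===== LEMMAS AND PROOFS =====

-- r is THE mex of s: r ∉ s and every smaller natural is in s
def mexP (s : List Int) (r : Nat) : Prop :=
  ((r : Int) ∉ s) ∧ ∀ k : Nat, k < r → ((k : Int) ∈ s)

theorem mexP_unique {s t : List Int} {r r' : Nat}
    (hmem : ∀ x : Int, x ∈ s ↔ x ∈ t) (h : mexP s r) (h' : mexP t r') : r = r' := by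
  rcases Nat.lt_trichotomy r r' with hlt | heq | hgt
  · exact absurd ((hmem _).mpr (h'.2 r hlt)) h.1
  · exact heq
  · exact absurd ((hmem _).mp (h.2 r' hgt)) h'.1

theorem whileMex_go : ∀ (fuel : Nat) (s : List Int) (m : Nat),
    (∀ k : Nat, k < m → ((k : Int) ∈ s)) →
    (∃ j : Nat, j ≤ fuel ∧ ((m + j : Nat) : Int) ∉ s) →
    mexP s (whileMex s m fuel) := by
  intro fuel
  induction fuel with
  | zero =>
    intro s m hlow ⟨j, hj, hout⟩
    interval_cases j
    simpa [whileMex, mexP] using ⟨by simpa using hout, hlow⟩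
  | succ f ih =>
    intro s m hlow ⟨j, hj, hout⟩
    by_cases hm : (m : Int) ∈ s
    · have hj0 : j ≠ 0 := by rintro rfl; simp at hout; exact hout hm
      obtain ⟨j', rfl⟩ := Nat.exists_eq_succ_of_ne_zero hj0
      have : mexP s (whileMex s (m + 1) f) := by
        apply ih
        · intro k hk
          rcases Nat.lt_succ_iff_lt_or_eq.mp hk with h | rfl
          · exact hlow k h
          · exact hm
        · exact ⟨j', by omega, by convert hout using 3; omega⟩
      simpa [whileMex, hm] using this
    · have heq : whileMex s m (f + 1) = m := by simp [whileMex, hm]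
      rw [heq]; exact ⟨hm, hlow⟩

-- fuel |s| is enough for a Nodup s whose elements below m are all present
theorem exists_fuel (s : List Int) (_hs : s.Nodup) (m : Nat)
    (_hlow : ∀ k : Nat, k < m → ((k : Int) ∈ s)) :
    ∃ j : Nat, j ≤ s.length ∧ ((m + j : Nat) : Int) ∉ s := by
  by_contra h
  push Not at h
  have hsub : ((List.range (s.length + 1)).map (fun j => ((m + j : Nat) : Int))) ⊆ s := by
    intro x hx
    simp only [List.mem_map, List.mem_range] at hx
    obtain ⟨j, hj, rfl⟩ := hx
    exact h j (by omega)
  have hnd : ((List.range (s.length + 1)).map (fun j => ((m + j : Nat) : Int))).Nodup := by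
    refine List.Nodup.map ?_ (List.nodup_range)
    intro a b hab
    have hab' : ((m + a : Nat) : Int) = ((m + b : Nat) : Int) := hab
    have : m + a = m + b := by exact_mod_cast hab'
    omega
  have h1 : ((List.range (s.length + 1)).map (fun j => ((m + j : Nat) : Int))).toFinset.card
      = s.length + 1 := by
    rw [List.toFinset_card_of_nodup hnd]; simp
  have h2 : ((List.range (s.length + 1)).map (fun j => ((m + j : Nat) : Int))).toFinset ⊆
      s.toFinset := by
    intro x hx; simp only [List.mem_toFinset] at *; exact hsub hx
  have h3 := Finset.card_le_card h2
  have h4 := s.toFinset_card_le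
  omega

theorem whileMex_mexP (s : List Int) (hs : s.Nodup) (m : Nat)
    (hlow : ∀ k : Nat, k < m → ((k : Int) ∈ s)) : mexP s (whileMex s m s.length) :=
  whileMex_go s.length s m hlow (exists_fuel s hs m hlow)

theorem pyMEX_mexP (a : List Int) : mexP a (pyMEX a) := by
  have h := whileMex_mexP (PySem.Set.ofList a) (PySem.Set.nodup_ofList a) 0 (by omega)
  unfold pyMEX
  exact ⟨fun hc => h.1 (by simpa [PySem.Set.mem_ofList] using hc),
         fun k hk => by simpa [PySem.Set.mem_ofList] using h.2 k hk⟩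

theorem pyMEX_congr {a b : List Int} (h : ∀ x : Int, x ∈ a ↔ x ∈ b) : pyMEX a = pyMEX b :=
  mexP_unique h (pyMEX_mexP a) (pyMEX_mexP b)

theorem fold_inv : ∀ (arr pref seen : List Int) (m : Nat) (acc : List Nat),
    seen.Nodup → (∀ x : Int, x ∈ seen ↔ x ∈ pref) → mexP seen m →
    (arr.foldl mexStep (seen, m, acc)).2.2 =
      acc ++ (List.range arr.length).map (fun i => pyMEX (pref ++ arr.take (i + 1))) := by
  intro arr
  induction arr with
  | nil => intro pref seen m acc _ _ _; simp
  | cons x rest ih =>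
    intro pref seen m acc hnd hmem hmx
    have hnd' : (PySem.Set.add seen x).Nodup := PySem.Set.nodup_add _ _ hnd
    have hmem' : ∀ y : Int, y ∈ PySem.Set.add seen x ↔ y ∈ pref ++ [x] := by
      intro y; simp [PySem.Set.mem_add, hmem y]
    have hmx' : mexP (PySem.Set.add seen x)
        (whileMex (PySem.Set.add seen x) m (PySem.Set.add seen x).length) := by
      apply whileMex_mexP _ hnd'
      intro k hk
      exact (PySem.Set.mem_add _ _ _).mpr (Or.inl (hmx.2 k hk))
    have hm' : whileMex (PySem.Set.add seen x) m (PySem.Set.add seen x).length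
        = pyMEX (pref ++ [x]) :=
      mexP_unique hmem' hmx' (pyMEX_mexP (pref ++ [x]))
    have step : (x :: rest).foldl mexStep (seen, m, acc)
        = rest.foldl mexStep (mexStep (seen, m, acc) x) := by simp
    rw [step]
    show (rest.foldl mexStep
        (PySem.Set.add seen x,
         whileMex (PySem.Set.add seen x) m (PySem.Set.add seen x).length,
         acc ++ [whileMex (PySem.Set.add seen x) m (PySem.Set.add seen x).length])).2.2 = _
    rw [ih (pref ++ [x]) _ _ _ hnd' hmem' hmx', hm']
    show _ = acc ++ List.map (fun i => pyMEX (pref ++ List.take (i + 1) (x :: rest)))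
        (List.range (rest.length + 1))
    rw [List.range_succ_eq_map, List.map_cons, List.map_map]
    simp [Function.comp_def, List.append_assoc]

theorem mexList_eq (arr : List Int) :
    mexList arr = (List.range arr.length).map (fun i => pyMEX (arr.take (i + 1))) := by
  have h := fold_inv arr [] [] 0 []
    (List.nodup_nil) (by simp) (⟨by simp, fun k hk => by omega⟩)
  simpa [mexList, PySem.Set.empty] using h

theorem getD_map_range' {α : Type} (f : Nat → α) (n i : Nat) (d : α) (h : i < n) :
    (((List.range n).map f).getD i d) = f i := by
  rw [List.getD_eq_getElem?_getD]
  simp [h]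

theorem pm_getD (arr : List Int) (i : Nat) (h : i < arr.length) :
    (mexList arr).getD i 0 = pyMEX (arr.take (i + 1)) := by
  rw [mexList_eq]; exact getD_map_range' _ _ _ _ h

theorem sm_getD (arr : List Int) (j : Nat) (h : j < arr.length) :
    ((mexList arr.reverse).reverse).getD j 0 = pyMEX (arr.drop j) := by
  rw [mexList_eq]
  have hlen : ((List.range arr.reverse.length).map
      (fun i => pyMEX (arr.reverse.take (i + 1)))).length = arr.length := by simp
  rw [List.getD_eq_getElem?_getD, List.getElem?_reverse (by simpa [hlen] using h)]
  rw [hlen]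
  have h2 : arr.length - 1 - j < arr.reverse.length := by simp; omega
  rw [List.getElem?_map, List.getElem?_range (by simpa using h2)]
  simp only [Option.map_some, Option.getD_some]
  have htake : arr.reverse.take (arr.length - 1 - j + 1) = (arr.drop j).reverse := by
    rw [List.reverse_drop]
    congr 1
    omega
  rw [htake]
  exact pyMEX_congr (by intro x; simp)

theorem all_congr' {α : Type} (l : List α) (f g : α → Bool)
    (h : ∀ x ∈ l, f x = g x) : l.all f = l.all g := by
  induction l with
  | nil => rfl
  | cons y t ih => simp only [List.all_cons, h y (by simp), ih (fun x hx => h x (by simp [hx]))]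

theorem check_eq_validB (arr : List Int) : checkValidOrdering arr = validB arr := by
  unfold checkValidOrdering validB
  apply all_congr'
  intro i hi
  simp only [List.mem_range] at hi
  have hi1 : i < arr.length := by omega
  have hi2 : i + 1 < arr.length := by omega
  have hsl1 : PySem.List.slice arr none (some ((i : Int) + 1)) = arr.take (i + 1) := by
    have : ((i : Int) + 1) = ((i + 1 : Nat) : Int) := by push_cast; ring
    rw [this, PySem.List.slice_to_natCast]
  have hsl2 : PySem.List.slice arr (some ((i : Int) + 1)) none = arr.drop (i + 1) := by
    have : ((i : Int) + 1) = ((i + 1 : Nat) : Int) := by push_cast; ring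
    rw [this, PySem.List.slice_from_natCast]
  rw [hsl1, hsl2, pm_getD arr i hi1, sm_getD arr (i + 1) hi2]

-- ===== VERDICT (by name: the statement is the Claim_ definition above) =====
theorem can_reorder_spec : Claim_equal_can_reorder := by
  intro a _
  unfold Spec_can_reorder can_reorder can_reorder_alt
  simp only [List.any_cons, List.any_nil, check_eq_validB, Bool.or_false, Bool.or_assoc]
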